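-- pv_equiv track=rewrite | github.com/adithyaraghuraman98/architecture | szzComputeMetrics.py | switches
-- ===== SOURCE A (Python) =====
-- def find_projects(commits):
--     projects = []
--     for elem in commits:
--         projects.append(elem[1])
--     return projects
--
-- def switches(commits):
--     projects = find_projects(commits)
--     i = 0
--     switch = 0
--     while i < len(projects) - 1:
--         if projects[i] != projects[i + 1]:
--             switch += 1
--         i += 1
--     return switch
-- ===== SOURCE B (Python) =====
-- def switches(commits):
--     # Divide and conquer on index ranges: switches in [lo,hi) =
--     # switches in each half plus the one boundary comparison at mid.
--     def rec(lo, hi):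
--         if hi - lo < 2:
--             return 0
--         mid = (lo + hi) // 2
--         return rec(lo, mid) + rec(mid, hi) + (1 if commits[mid - 1][1] != commits[mid][1] else 0)
--     return rec(0, len(commits))
-- ===== Notes on version B (the rewrite author's own statement) =====
-- stated objective: alternative
-- what changed: Replaces the projects-list build plus sequential pairwise while-loop by a divide-and-conquer recursion on index ranges: each range is split at its midpoint, halves are solved recursively, and only the single boundary pair at the midpoint is compared; no intermediate projects list is built.
import Mathlib
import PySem

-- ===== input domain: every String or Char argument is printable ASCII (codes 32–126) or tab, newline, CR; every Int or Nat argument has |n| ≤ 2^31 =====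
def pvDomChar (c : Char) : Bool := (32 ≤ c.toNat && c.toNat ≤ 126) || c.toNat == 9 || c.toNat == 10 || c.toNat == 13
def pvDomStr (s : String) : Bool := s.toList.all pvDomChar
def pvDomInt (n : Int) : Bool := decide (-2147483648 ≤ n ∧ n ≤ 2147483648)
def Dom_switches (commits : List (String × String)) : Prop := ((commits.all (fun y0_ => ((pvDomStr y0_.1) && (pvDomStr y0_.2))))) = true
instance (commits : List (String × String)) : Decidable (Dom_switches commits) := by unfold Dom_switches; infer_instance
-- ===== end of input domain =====

-- B replaces the projects-list build and sequential pairwise loop by a divide-and-conquer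
-- recursion on index ranges (alternative decomposition, same O(n) cost).


-- ===== PORT A =====
-- find_projects: append elem[1] for each elem
def findProjects (commits : List (String × String)) : List String :=
  commits.foldl (fun acc e => acc ++ [e.2]) []

-- the while loop: i from 0 while i < len(projects) - 1
def switchesLoop (projects : List String) (i : Nat) (switch : Int) : Int :=
  if _h : i < projects.length - 1 then
    switchesLoop projects (i + 1)
      (if projects.getD i "" ≠ projects.getD (i + 1) "" then switch + 1 else switch)
  else switch
termination_by projects.length - 1 - i

def switches (commits : List (String × String)) : Int :=
  switchesLoop (findProjects commits) 0 0

-- ===== PORT B =====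
-- rec(lo, hi): divide and conquer on the index range [lo, hi)
def switchesRec (commits : List (String × String)) (lo hi : Nat) : Int :=
  if _h : hi - lo < 2 then 0
  else
    let mid := (lo + hi) / 2
    switchesRec commits lo mid + switchesRec commits mid hi +
      (if (commits.getD (mid - 1) ("", "")).2 ≠ (commits.getD mid ("", "")).2 then 1 else 0)
termination_by hi - lo
decreasing_by all_goals omega

def switches_alt (commits : List (String × String)) : Int :=
  switchesRec commits 0 commits.length

-- ===== PRECONDITION & SPEC =====
def Spec_switches (commits : List (String × String)) (out : Int) : Prop := out = switches_alt commits
instance (commits : List (String × String)) (out : Int) : Decidable (Spec_switches commits out) := by unfold Spec_switches; infer_instance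

-- ===== CLAIM (what is proved, stated in full; the proofs are below) =====
def Claim_equal_switches : Prop := ∀ (commits : List (String × String)), Dom_switches commits → Spec_switches commits (switches commits)

-- ===== LEMMAS AND PROOFS =====

-- common characterisation: number of indices i in [lo, hi-1) with projects[i] ≠ projects[i+1]
def cnt (commits : List (String × String)) (lo hi : Nat) : Int :=
  ((List.range' lo (hi - 1 - lo)).countP
    (fun i => decide ((commits.getD i ("", "")).2 ≠ (commits.getD (i + 1) ("", "")).2)) : Nat)

theorem findProjects_eq_map (commits : List (String × String)) :
    findProjects commits = commits.map (·.2) := by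
  unfold findProjects
  suffices h : ∀ acc : List String, commits.foldl (fun acc e => acc ++ [e.2]) acc
      = acc ++ commits.map (·.2) by simpa using h []
  induction commits with
  | nil => simp
  | cons x xs ih => intro acc; simp [List.foldl, ih]

theorem findProjects_getD (commits : List (String × String)) (i : Nat) :
    (findProjects commits).getD i "" = (commits.getD i ("", "")).2 := by
  rw [findProjects_eq_map]
  simp only [List.getD_eq_getElem?_getD, List.getElem?_map]
  cases commits[i]? <;> simp

theorem switchesLoop_eq (commits : List (String × String)) (i : Nat) (s : Int) :
    switchesLoop (findProjects commits) i s = s + cnt commits i (findProjects commits).length := by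
  fun_induction switchesLoop (findProjects commits) i s with
  | case1 i s h ih =>
    simp only [dite_eq_ite] at ih
    rw [ih]
    have hlen : (findProjects commits).length - 1 - i = ((findProjects commits).length - 1 - (i + 1)) + 1 := by omega
    unfold cnt
    rw [hlen, List.range'_succ, List.countP_cons]
    simp only [findProjects_getD]
    split <;> simp_all <;> push_cast <;> ring
  | case2 i s h =>
    have : (findProjects commits).length - 1 - i = 0 := by omega
    simp [cnt, this]

theorem switchesRec_eq (commits : List (String × String)) (lo hi : Nat) :
    switchesRec commits lo hi = cnt commits lo hi := by
  fun_induction switchesRec commits lo hi with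
  | case1 lo hi h =>
    have : hi - 1 - lo = 0 := by omega
    simp [cnt, this]
  | case2 lo hi h mid ih1 ih2 =>
    have h1 : lo + 1 ≤ mid := by omega
    have h2 : mid + 1 ≤ hi := by omega
    rw [ih1, ih2]
    unfold cnt
    have hsplit : List.range' lo (hi - 1 - lo) =
        List.range' lo (mid - 1 - lo) ++ List.range' (mid - 1) (hi - mid) := by
      have := @List.range'_append lo (mid - 1 - lo) (hi - mid) 1
      simp only [one_mul] at this
      rw [show lo + (mid - 1 - lo) = mid - 1 by omega] at this
      rw [show (mid - 1 - lo) + (hi - mid) = hi - 1 - lo by omega] at this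
      exact this.symm
    have hcons : List.range' (mid - 1) (hi - mid) = (mid - 1) :: List.range' mid (hi - 1 - mid) := by
      rw [show hi - mid = (hi - 1 - mid) + 1 by omega, List.range'_succ,
        show mid - 1 + 1 = mid by omega]
    rw [hsplit, hcons, List.countP_append, List.countP_cons]
    rw [show mid - 1 + 1 = mid by omega]
    split <;> simp_all <;> push_cast <;> ring
  
-- ===== VERDICT (by name: the statement is the Claim_ definition above) =====
theorem switches_spec : Claim_equal_switches := by
  intro commits _
  unfold Spec_switches switches switches_alt
  rw [switchesLoop_eq, switchesRec_eq]
  have hlen : (findProjects commits).length = commits.length := by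
    rw [findProjects_eq_map]; simp
  rw [hlen]; ring
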